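-- pv_equiv track=rewrite | github.com/pypi-data/pypi-mirror-392 | packages/xarray-eopf/xarray_eopf-0.2.4-py3-none-any.whl/xarray_eopf/prefix.py | get_unique_short_sequences
-- ===== SOURCE A (Python) =====
-- from collections import defaultdict
-- from collections.abc import Collection, Hashable, Mapping, Sequence
-- from typing import Callable, TypeVar
--
-- T = TypeVar("T", bound=Hashable)
--
-- def get_common_prefix(seq1: Sequence[T], seq2: Sequence[T]) -> Sequence[T]:
--     prefix = []
--     for item1, item2 in zip(seq1, seq2):
--         if item1 == item2:
--             prefix.append(item1)
--         else:
--             break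
--     if len(prefix) == len(seq1) and len(prefix) == len(seq2):
--         return []
--     return prefix
--
-- def get_unique_short_sequences(
--     sequences: Collection[Sequence[T]],
-- ) -> Mapping[tuple[T, ...], tuple[T, ...]]:
--     return _get_unique_short_sequences(
--         [s if isinstance(s, tuple) else tuple(s) for s in sequences],
--         get_common_prefix,
--         (),
--     )
--
-- def _get_unique_short_sequences(
--     sequences: Collection[tuple[T, ...]],
--     get_prefix: Callable[[T, T], T],
--     max_default: T,
-- ) -> Mapping[tuple[T, ...], tuple[T, ...]]:
--     mapping = {}
--     prefix_groups = defaultdict(list)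
--
--     for sequence in sequences:
--         for other in sequences:
--             if sequence != other:
--                 prefix = get_prefix(sequence, other)
--                 prefix_groups[sequence].append(prefix)
--
--     for sequence in sequences:
--         max_prefix = max(prefix_groups[sequence], key=len, default=max_default)
--         unique_part = sequence[len(max_prefix) :]
--         mapping[sequence] = unique_part if unique_part else sequence
--
--     return mapping
-- ===== SOURCE B (Python) =====
-- def get_unique_short_sequences(sequences):
--     seqs = [s if isinstance(s, tuple) else tuple(s) for s in sequences]
--     order = list(dict.fromkeys(seqs))  # distinct sequences, first-occurrence order
--     srt = sorted(order)
--     adj = [lcp_len(a, b) for a, b in zip(srt, srt[1:])]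
--     best = {}
--     for i, s in enumerate(srt):
--         left = adj[i - 1] if i > 0 else 0
--         right = adj[i] if i < len(adj) else 0
--         best[s] = left if right < left else right
--     mapping = {}
--     for s in order:
--         tail = s[best[s]:]
--         mapping[s] = tail if tail else s
--     return mapping
--
--
-- def lcp_len(a, b):
--     n = 0
--     for x, y in zip(a, b):
--         if x != y:
--             break
--         n += 1
--     return n
-- ===== Notes on version B (the rewrite author's own statement) =====
-- stated objective: faster
-- what changed: A compares every pair of sequences to collect common prefixes (all-pairs scan plus per-sequence max); B sorts the distinct sequences once and takes each sequence's longest common prefix with just its two sorted neighbours, which is provably the maximum over all others.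
import Mathlib
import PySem

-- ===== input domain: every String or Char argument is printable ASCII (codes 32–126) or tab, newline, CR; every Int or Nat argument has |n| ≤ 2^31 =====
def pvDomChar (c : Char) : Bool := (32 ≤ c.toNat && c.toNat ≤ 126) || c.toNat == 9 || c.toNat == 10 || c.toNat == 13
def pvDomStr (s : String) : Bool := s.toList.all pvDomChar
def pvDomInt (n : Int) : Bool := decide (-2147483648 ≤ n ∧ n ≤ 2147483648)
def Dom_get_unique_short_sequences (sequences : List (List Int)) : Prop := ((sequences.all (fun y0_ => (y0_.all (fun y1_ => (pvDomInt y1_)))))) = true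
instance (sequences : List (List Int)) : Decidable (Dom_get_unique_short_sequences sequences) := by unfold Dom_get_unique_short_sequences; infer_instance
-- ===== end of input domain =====

-- B replaces A's all-pairs common-prefix scan by sorting the distinct sequences once and
-- taking each sequence's longest common prefix with its two sorted neighbours (alternative
-- algorithm; asymptotically fewer sequence comparisons).

-- ===== PORT A =====
-- get_common_prefix: the for/zip loop with break
def gcpLoop : List (Int × Int) → List Int
  | [] => []
  | (a, b) :: rest => if a = b then a :: gcpLoop rest else []

def get_common_prefix (seq1 seq2 : List Int) : List Int :=
  let pfx := gcpLoop (seq1.zip seq2)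
  if pfx.length = seq1.length ∧ pfx.length = seq2.length then [] else pfx

-- _get_unique_short_sequences inlined into the entry point (get_prefix = get_common_prefix,
-- max_default = ()); '[tuple(s) for s in sequences]' is the identity under the List Int encoding.
-- defaultdict read prefix_groups[sequence] yields [] when the key is absent (the read's
-- insert-on-access mutation is unobservable in the result): Dict.getD _ [].
def get_unique_short_sequences (sequences : List (List Int)) : List (List Int × List Int) :=
  let seqs := sequences
  let prefix_groups : PySem.Dict (List Int) (List (List Int)) :=
    seqs.foldl (fun pg sequence =>
      seqs.foldl (fun pg other =>
        if sequence ≠ other then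
          pg.modify sequence [] (· ++ [get_common_prefix sequence other])
        else pg) pg)
      PySem.Dict.empty
  let mapping : PySem.Dict (List Int) (List Int) :=
    seqs.foldl (fun m sequence =>
      let max_prefix := PySem.List.maxD (prefix_groups.getD sequence []) (fun p => PySem.List.len p) []
      let unique_part := PySem.List.slice sequence (some (PySem.List.len max_prefix)) none
      m.insert sequence (if unique_part ≠ [] then unique_part else sequence))
      PySem.Dict.empty
  mapping.items

-- ===== PORT B =====
-- lcp_len: n = 0; for x, y in zip(a, b): if x != y: break; n += 1
def lcpGo : List (Int × Int) → Nat
  | [] => 0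
  | (x, y) :: rest => if x = y then lcpGo rest + 1 else 0

def lcp_len (a b : List Int) : Nat := lcpGo (a.zip b)

-- the 'for i, s in enumerate(srt): best[s] = ...' loop
def bestDict (srt : List (List Int)) (adj : List Nat) : PySem.Dict (List Int) Nat :=
  (PySem.List.enumerate srt).foldl (fun d p =>
    let left := if 0 < p.1 then PySem.List.pyGetD adj (p.1 - 1) 0 else 0
    let right := if p.1 < PySem.List.len adj then PySem.List.pyGetD adj p.1 0 else 0
    d.insert p.2 (if right < left then left else right))
    PySem.Dict.empty

def get_unique_short_sequences_alt (sequences : List (List Int)) : List (List Int × List Int) :=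
  let order := PySem.List.dedup sequences           -- list(dict.fromkeys(seqs))
  let srt := PySem.List.sorted order (fun x => x) false
  let adj := (srt.zip (srt.drop 1)).map (fun (p : List Int × List Int) => lcp_len p.1 p.2)   -- zip(srt, srt[1:])
  let best := bestDict srt adj
  let mapping : PySem.Dict (List Int) (List Int) :=
    order.foldl (fun m s =>
      let tl := s.drop (best.getD s 0)              -- s[best[s]:]
      m.insert s (if tl ≠ [] then tl else s))
      PySem.Dict.empty
  mapping.items

-- ===== PRECONDITION & SPEC =====
def Spec_get_unique_short_sequences (sequences : List (List Int)) (out : List (List Int × List Int)) : Prop := out = get_unique_short_sequences_alt sequences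
instance (sequences : List (List Int)) (out : List (List Int × List Int)) : Decidable (Spec_get_unique_short_sequences sequences out) := by unfold Spec_get_unique_short_sequences; infer_instance

-- ===== CLAIM (what is proved, stated in full; the proofs are below) =====
def Claim_equal_get_unique_short_sequences : Prop := ∀ (sequences : List (List Int)), Dom_get_unique_short_sequences sequences → Spec_get_unique_short_sequences sequences (get_unique_short_sequences sequences)

-- ===== LEMMAS AND PROOFS =====

-- model: for each distinct sequence s (first-occurrence order), the tail after the longest
-- common prefix with any other sequence (or s itself when that tail is empty)
def bestOf (s : List Int) (l : List (List Int)) : Nat :=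
  ((l.filter (fun t => s ≠ t)).map (fun t => lcp_len s t)).foldl max 0

def finish (s : List Int) (L : Nat) : List Int :=
  if s.drop L = [] then s else s.drop L

def modelOut (sequences : List (List Int)) : List (List Int × List Int) :=
  (PySem.List.dedup sequences).map (fun s => (s, finish s (bestOf s sequences)))

-- ---- lcp facts ----
theorem lcp_len_comm (a b : List Int) : lcp_len a b = lcp_len b a := by
  induction a generalizing b with
  | nil => cases b <;> simp [lcp_len, lcpGo]
  | cons x a ih =>
    cases b with
    | nil => simp [lcp_len, lcpGo]
    | cons y b =>
      simp only [lcp_len, List.zip_cons_cons, lcpGo]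
      rcases eq_or_ne x y with h | h
      · subst h; simpa [lcp_len] using ih b
      · simp [h, Ne.symm h]

theorem eq_of_lcp_len_lengths (a b : List Int) (h1 : lcp_len a b = a.length)
    (h2 : lcp_len a b = b.length) : a = b := by
  induction a generalizing b with
  | nil => cases b with
    | nil => rfl
    | cons y b => simp [lcp_len, lcpGo] at h2
  | cons x a ih =>
    cases b with
    | nil => simp [lcp_len, lcpGo] at h1
    | cons y b =>
      simp only [lcp_len, List.zip_cons_cons, lcpGo, List.length_cons] at h1 h2 ⊢
      rcases eq_or_ne x y with h | h
      · subst h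
        rw [if_pos rfl] at h1 h2
        exact congrArg (List.cons x) (ih b (by simp only [lcp_len]; omega) (by simp only [lcp_len]; omega))
      · simp [h] at h1

theorem gcpLoop_length (z : List (Int × Int)) : (gcpLoop z).length = lcpGo z := by
  induction z with
  | nil => rfl
  | cons p rest ih =>
    obtain ⟨a, b⟩ := p
    simp only [gcpLoop, lcpGo]
    split <;> simp [ih]

theorem gcp_length_of_ne (a b : List Int) (h : a ≠ b) :
    (get_common_prefix a b).length = lcp_len a b := by
  unfold get_common_prefix
  simp only
  split
  · rename_i hc
    rw [gcpLoop_length] at hc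
    exact absurd (eq_of_lcp_len_lengths a b hc.1 hc.2) h
  · exact gcpLoop_length _

theorem lcp_between (a b c : List Int) (hab : a < b) (hbc : b < c) :
    lcp_len a c ≤ lcp_len a b ∧ lcp_len a c ≤ lcp_len b c := by
  induction a generalizing b c with
  | nil => simp [lcp_len, lcpGo]
  | cons x a ih =>
    cases c with
    | nil => simp [lcp_len, lcpGo]
    | cons z c =>
      cases b with
      | nil => exact absurd hab (by simp)
      | cons y b =>
        rw [List.cons_lt_cons_iff] at hab hbc
        simp only [lcp_len, List.zip_cons_cons, lcpGo]
        rcases eq_or_ne x z with hxz | hxz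
        · subst hxz
          have hxy : x = y ∧ a < b := by
            rcases hab with h | h
            · rcases hbc with h' | h' <;> [exact absurd (h.trans h') (lt_irrefl x); exact absurd (h'.1 ▸ h) (lt_irrefl x)]
            · exact h
          have hyz : b < c := by
            rcases hbc with h' | h'
            · exact absurd (hxy.1 ▸ h') (lt_irrefl x)
            · exact h'.2
          obtain ⟨h1, h2⟩ := ih b c hxy.2 hyz
          simp only [lcp_len] at h1 h2
          simp [hxy.1]
          omega
        · simp [hxz]

-- ---- fold-max facts ----
theorem foldl_max_acc (l : List Nat) (a : Nat) : l.foldl max a = max a (l.foldl max 0) := by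
  induction l generalizing a with
  | nil => simp
  | cons x t ih =>
    simp only [List.foldl_cons]
    rw [ih (max a x), ih (max 0 x)]
    omega

theorem foldl_max_le {l : List Nat} {m : Nat} (h : ∀ x ∈ l, x ≤ m) : l.foldl max 0 ≤ m := by
  induction l with
  | nil => simp
  | cons x t ih =>
    simp only [List.foldl_cons]
    rw [foldl_max_acc]
    have := h x (by simp)
    have := ih (fun y hy => h y (by simp [hy]))
    omega

theorem le_foldl_max' {l : List Nat} {x : Nat} (h : x ∈ l) : x ≤ l.foldl max 0 := by
  induction l with
  | nil => simp at h
  | cons y t ih =>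
    simp only [List.foldl_cons]
    rw [foldl_max_acc]
    rcases List.mem_cons.mp h with h | h
    · omega
    · have := ih h; omega

theorem foldl_max_append (l₁ l₂ : List Nat) :
    (l₁ ++ l₂).foldl max 0 = max (l₁.foldl max 0) (l₂.foldl max 0) := by
  rw [List.foldl_append, foldl_max_acc]

theorem foldl_max_replicate_flatten (n : Nat) (hn : 0 < n) (X : List Nat) :
    ((List.replicate n X).flatten).foldl max 0 = X.foldl max 0 := by
  induction n with
  | zero => omega
  | succ n ih =>
    rw [List.replicate_succ, List.flatten_cons, foldl_max_append]
    rcases Nat.eq_zero_or_pos n with h | h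
    · subst h; simp
    · rw [ih h]; omega

theorem max?_len_aux (ps : List (List Int)) (m : List Int) :
    ∃ r, PySem.List.max? (m :: ps) (fun p => PySem.List.len p) = some r ∧
      r.length = (ps.map List.length).foldl max m.length := by
  induction ps generalizing m with
  | nil => exact ⟨m, rfl, by simp⟩
  | cons x t ih =>
    have step : PySem.List.max? (m :: x :: t) (fun p => PySem.List.len p)
        = PySem.List.max? ((if PySem.List.len m < PySem.List.len x then x else m) :: t)
            (fun p => PySem.List.len p) := by
      simp only [PySem.List.max?, List.foldl_cons]
      split <;> rfl
    by_cases h : PySem.List.len m < PySem.List.len x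
    · rw [if_pos h] at step
      obtain ⟨r, hr, hlen⟩ := ih x
      refine ⟨r, step.trans hr, ?_⟩
      rw [hlen]
      simp only [List.map_cons, List.foldl_cons]
      congr 1
      simp only [PySem.List.len] at h
      omega
    · rw [if_neg h] at step
      obtain ⟨r, hr, hlen⟩ := ih m
      refine ⟨r, step.trans hr, ?_⟩
      rw [hlen]
      simp only [List.map_cons, List.foldl_cons]
      congr 1
      simp only [PySem.List.len] at h
      omega

theorem maxD_length (ps : List (List Int)) :
    (PySem.List.maxD ps (fun p => PySem.List.len p) []).length = (ps.map List.length).foldl max 0 := by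
  cases ps with
  | nil => simp [PySem.List.maxD, PySem.List.max?]
  | cons x t =>
    obtain ⟨r, hr, hlen⟩ := max?_len_aux t x
    simp only [PySem.List.maxD, hr, Option.getD_some, hlen, List.map_cons, List.foldl_cons]
    rw [Nat.zero_max]

-- ---- Dict facts ----
theorem map_id_of_not_key {V : Type} (k : List Int) (v : V) (items : List (List Int × V))
    (h : k ∉ items.map Prod.fst) :
    items.map (fun p => if p.1 == k then (k, v) else p) = items := by
  induction items with
  | nil => rfl
  | cons p rest ih =>
    simp only [List.map_cons, List.mem_cons, not_or] at h ⊢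
    rw [if_neg (by simp only [beq_iff_eq]; exact fun hh => h.1 hh.symm), ih h.2]

theorem insert_same {V : Type} (d : PySem.Dict (List Int) V) (k : List Int) (v : V)
    (hn : d.keys.Nodup) (h : d.get? k = some v) : d.insert k v = d := by
  obtain ⟨items⟩ := d
  simp only [PySem.Dict.get?, PySem.Dict.items] at h
  have hc : (PySem.Dict.mk items : PySem.Dict (List Int) V).contains k = true := by
    simp only [PySem.Dict.contains, PySem.Dict.items]
    obtain ⟨pv, hfind, -⟩ := Option.map_eq_some_iff.mp h
    exact List.any_eq_true.mpr ⟨pv, List.mem_of_find?_eq_some hfind, by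
      have := List.find?_some hfind; simpa using this⟩
  simp only [PySem.Dict.insert, hc, if_pos, PySem.Dict.items]
  congr 1
  simp only [PySem.Dict.keys, PySem.Dict.items] at hn
  clear hc
  induction items with
  | nil => simp at h
  | cons p rest ih =>
    simp only [List.map_cons, List.nodup_cons] at hn
    by_cases hpk : p.1 = k
    · have hv : p.2 = v := by
        rw [List.find?_cons_of_pos (by simp [hpk])] at h
        simpa using h
      simp only [List.map_cons, if_pos (show (p.1 == k) = true by simp [hpk])]
      rw [map_id_of_not_key k v rest (by rw [← hpk]; exact hn.1)]
      rw [← hpk, ← hv]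
    · rw [List.find?_cons_of_neg (by simp [hpk])] at h
      simp only [List.map_cons, if_neg (show ¬ (p.1 == k) = true by simp [hpk])]
      rw [ih hn.2 h]

theorem foldl_insert_skip {V : Type} (f : List Int → V) (l : List (List Int)) (x : List Int)
    (d : PySem.Dict (List Int) V) (hn : d.keys.Nodup) (hd : d.get? x = some (f x)) :
    l.foldl (fun m s => m.insert s (f s)) d
      = (l.filter (fun y => y ≠ x)).foldl (fun m s => m.insert s (f s)) d := by
  induction l generalizing d with
  | nil => rfl
  | cons y t ih =>
    rw [List.filter_cons]
    by_cases hyx : y = x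
    · subst hyx
      rw [if_neg (by simp)]
      simp only [List.foldl_cons]
      rw [insert_same d y (f y) hn hd]
      exact ih d hn hd
    · rw [if_pos (by simp [hyx])]
      simp only [List.foldl_cons]
      exact ih (d.insert y (f y)) (PySem.Dict.nodup_keys_insert d y (f y) hn)
        (by rw [PySem.Dict.get?_insert, if_neg (Ne.symm hyx)]; exact hd)

theorem foldl_add_skip (x : List Int) (t : List (List Int)) :
    ∀ (acc : List (List Int)), x ∈ acc →
      t.foldl PySem.Set.add acc = (t.filter (fun y => y ≠ x)).foldl PySem.Set.add acc := by
  induction t with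
  | nil => intro acc _; rfl
  | cons y t ih =>
    intro acc hx
    rw [List.filter_cons]
    by_cases hyx : y = x
    · subst hyx
      rw [if_neg (by simp)]
      simp only [List.foldl_cons]
      have : PySem.Set.add acc y = acc := by
        simp [PySem.Set.add, PySem.Set.contains, List.contains_eq_mem, hx]
      rw [this]
      exact ih acc hx
    · rw [if_pos (by simp [hyx])]
      simp only [List.foldl_cons]
      refine ih _ ?_
      simp only [PySem.Set.add]
      split
      · exact hx
      · exact List.mem_append_left _ hx

theorem foldl_add_cons_head (x : List Int) (t : List (List Int)) (hnx : ∀ y ∈ t, y ≠ x) :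
    ∀ (acc : List (List Int)), t.foldl PySem.Set.add (x :: acc) = x :: t.foldl PySem.Set.add acc := by
  induction t with
  | nil => intro acc; rfl
  | cons y t ih =>
    intro acc
    simp only [List.foldl_cons]
    have hyx : y ≠ x := hnx y (by simp)
    have : PySem.Set.add (x :: acc) y = x :: PySem.Set.add acc y := by
      simp only [PySem.Set.add, PySem.Set.contains, List.contains_eq_mem, List.mem_cons,
        decide_eq_true_eq]
      by_cases hy : y ∈ acc
      · rw [if_pos (by simp [hy]), if_pos (by simp [hy])]
      · rw [if_neg (by simp [hy, hyx]), if_neg (by simp [hy])]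
        rfl
    rw [this]
    exact ih (fun z hz => hnx z (by simp [hz])) _

theorem dedup_cons (x : List Int) (t : List (List Int)) :
    PySem.List.dedup (x :: t) = x :: PySem.List.dedup (t.filter (fun y => y ≠ x)) := by
  simp only [PySem.List.dedup, PySem.Set.ofList, List.foldl_cons]
  have h1 : PySem.Set.add PySem.Set.empty x = [x] := rfl
  rw [h1, foldl_add_skip x t [x] (by simp)]
  exact foldl_add_cons_head x (t.filter (fun y => y ≠ x))
    (fun y hy => by simpa using (List.mem_filter.mp hy).2) []

theorem foldl_insert_eq_dedup {V : Type} (f : List Int → V) (l : List (List Int))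
    (d : PySem.Dict (List Int) V) (hn : d.keys.Nodup)
    (hP : ∀ k v, d.get? k = some v → v = f k) :
    l.foldl (fun m s => m.insert s (f s)) d
      = (PySem.List.dedup l).foldl (fun m s => m.insert s (f s)) d := by
  have main : ∀ (n : Nat) (l : List (List Int)) (d : PySem.Dict (List Int) V),
      l.length ≤ n → d.keys.Nodup → (∀ k v, d.get? k = some v → v = f k) →
      l.foldl (fun m s => m.insert s (f s)) d
        = (PySem.List.dedup l).foldl (fun m s => m.insert s (f s)) d := by
    intro n
    induction n with
    | zero =>
      intro l d hlen _ _
      rw [List.eq_nil_of_length_eq_zero (Nat.le_zero.mp hlen)]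
      rfl
    | succ n ih =>
      intro l d hlen hn hP
      cases l with
      | nil => rfl
      | cons x t =>
        rw [dedup_cons]
        simp only [List.foldl_cons]
        have hn' := PySem.Dict.nodup_keys_insert d x (f x) hn
        have hget : (d.insert x (f x)).get? x = some (f x) := PySem.Dict.get?_insert_self d x (f x)
        have hP' : ∀ k v, (d.insert x (f x)).get? k = some v → v = f k := by
          intro k v hk
          rw [PySem.Dict.get?_insert] at hk
          split at hk
          · rename_i hkx; rw [hkx]; exact (Option.some_inj.mp hk).symm
          · exact hP k v hk
        rw [foldl_insert_skip f t x _ hn' hget]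
        exact ih (t.filter (fun y => y ≠ x)) (d.insert x (f x))
          (le_trans (List.length_filter_le _ _) (by simpa using hlen)) hn' hP'
  exact main l.length l d le_rfl hn hP

theorem final_items {V : Type} (f : List Int → V) (l : List (List Int)) :
    (l.foldl (fun m s => m.insert s (f s)) PySem.Dict.empty).items
      = (PySem.List.dedup l).map (fun s => (s, f s)) := by
  rw [foldl_insert_eq_dedup f l PySem.Dict.empty (by rw [PySem.Dict.keys_empty]; exact List.nodup_nil)
    (by intro k v hk; rw [PySem.Dict.get?_empty] at hk; cases hk)]
  have := PySem.Dict.items_foldl_insert_fresh (PySem.List.dedup l) (fun s => s) f PySem.Dict.empty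
    (fun a _ => PySem.Dict.contains_empty a) (by simpa using PySem.List.nodup_dedup l)
  simpa using this

-- ---- prefix_groups characterization ----
theorem pg_inner (seqs : List (List Int)) (sq : List Int) :
    ∀ (pg : PySem.Dict (List Int) (List (List Int))) (k : List Int),
    (seqs.foldl (fun pg other =>
        if sq ≠ other then pg.modify sq [] (· ++ [get_common_prefix sq other]) else pg) pg).getD k []
      = pg.getD k [] ++
        (if k = sq then (seqs.filter (fun t => sq ≠ t)).map (fun t => get_common_prefix sq t) else []) := by
  induction seqs with
  | nil => intro pg k; simp
  | cons o t ih =>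
    intro pg k
    simp only [List.foldl_cons]
    by_cases hso : sq = o
    · rw [List.filter_cons_of_neg (by simp [hso])]
      rw [if_neg (show ¬ sq ≠ o by simp [hso])]
      exact ih pg k
    · rw [List.filter_cons_of_pos (by simp [hso])]
      rw [if_pos (show sq ≠ o from hso)]
      rw [ih _ k, PySem.Dict.getD_modify]
      by_cases hks : k = sq
      · subst hks
        rw [if_pos rfl, if_pos rfl, if_pos rfl, List.map_cons, List.append_assoc]
        simp
      · rw [if_neg hks, if_neg hks, if_neg hks]

theorem pg_outer (seqs : List (List Int)) :
    ∀ (outer : List (List Int)) (pg : PySem.Dict (List Int) (List (List Int))) (k : List Int),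
    (outer.foldl (fun pg sq =>
        seqs.foldl (fun pg other =>
          if sq ≠ other then pg.modify sq [] (· ++ [get_common_prefix sq other]) else pg) pg) pg).getD k []
      = pg.getD k [] ++
        (List.replicate (outer.count k)
          ((seqs.filter (fun t => k ≠ t)).map (fun t => get_common_prefix k t))).flatten := by
  intro outer
  induction outer with
  | nil => intro pg k; simp
  | cons x rest ih =>
    intro pg k
    simp only [List.foldl_cons]
    rw [ih _ k, pg_inner seqs x pg k]
    rw [List.count_cons]
    by_cases hkx : k = x
    · subst hkx
      rw [if_pos rfl]
      simp only [beq_self_eq_true, if_pos, List.replicate_succ, List.flatten_cons,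
        List.append_assoc]
    · rw [if_neg hkx]
      have : (x == k) = false := by simp [hkx, Ne.symm, fun h : x = k => hkx h.symm]
      simp [this]

-- ---- A characterization ----
def A_val (sequences : List (List Int)) (s : List Int) : List Int :=
  let prefix_groups : PySem.Dict (List Int) (List (List Int)) :=
    sequences.foldl (fun pg sequence =>
      sequences.foldl (fun pg other =>
        if sequence ≠ other then
          pg.modify sequence [] (· ++ [get_common_prefix sequence other])
        else pg) pg)
      PySem.Dict.empty
  let max_prefix := PySem.List.maxD (prefix_groups.getD s []) (fun p => PySem.List.len p) []
  let unique_part := PySem.List.slice s (some (PySem.List.len max_prefix)) none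
  if unique_part ≠ [] then unique_part else s

theorem A_unfold (sequences : List (List Int)) :
    get_unique_short_sequences sequences
      = (sequences.foldl (fun m s => m.insert s (A_val sequences s)) PySem.Dict.empty).items := rfl

theorem FA_eq (sequences : List (List Int)) (s : List Int) (hs : s ∈ sequences) :
    A_val sequences s = finish s (bestOf s sequences) := by
  unfold A_val
  simp only
  have hpg := pg_outer sequences sequences PySem.Dict.empty s
  rw [show (PySem.Dict.empty : PySem.Dict (List Int) (List (List Int))).getD s [] = [] from rfl,
    List.nil_append] at hpg
  rw [hpg]
  have hcount : 0 < sequences.count s := List.count_pos_iff.mpr hs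
  have hlen : (PySem.List.maxD
      (List.replicate (sequences.count s)
        ((sequences.filter (fun t => s ≠ t)).map (fun t => get_common_prefix s t))).flatten
      (fun p => PySem.List.len p) []).length = bestOf s sequences := by
    rw [maxD_length, List.map_flatten, List.map_replicate, foldl_max_replicate_flatten _ hcount,
      List.map_map]
    unfold bestOf
    congr 1
    refine List.map_congr_left (fun t ht => ?_)
    have hne : s ≠ t := by simpa using (List.mem_filter.mp ht).2
    exact gcp_length_of_ne s t hne
  rw [show ∀ (mp : List Int), PySem.List.len mp = ((mp.length : Nat) : Int) from fun _ => rfl,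
    PySem.List.slice_from_natCast, hlen]
  unfold finish
  by_cases h : s.drop (bestOf s sequences) = []
  · rw [if_neg (by simp [h]), if_pos h]
  · rw [if_pos h, if_neg h]

theorem A_eq_model (sequences : List (List Int)) :
    get_unique_short_sequences sequences = modelOut sequences := by
  rw [A_unfold, final_items]
  unfold modelOut
  refine List.map_congr_left (fun s hs => ?_)
  rw [FA_eq sequences s ((PySem.List.mem_dedup _ _).mp hs)]

-- ---- B characterization ----
def bVal (adj : List Nat) (i : Int) : Nat :=
  let left := if 0 < i then PySem.List.pyGetD adj (i - 1) 0 else 0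
  let right := if i < PySem.List.len adj then PySem.List.pyGetD adj i 0 else 0
  if right < left then left else right

def B_val (sequences : List (List Int)) (s : List Int) : List Int :=
  let srt := PySem.List.sorted (PySem.List.dedup sequences) (fun x => x) false
  let adj := (srt.zip (srt.drop 1)).map (fun (p : List Int × List Int) => lcp_len p.1 p.2)
  let tl := s.drop ((bestDict srt adj).getD s 0)
  if tl ≠ [] then tl else s

theorem B_unfold (sequences : List (List Int)) :
    get_unique_short_sequences_alt sequences
      = ((PySem.List.dedup sequences).foldl
          (fun m s => m.insert s (B_val sequences s)) PySem.Dict.empty).items := rfl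

theorem dedup_of_nodup (l : List (List Int)) (h : l.Nodup) : PySem.List.dedup l = l := by
  induction l with
  | nil => rfl
  | cons x t ih =>
    have hx := List.nodup_cons.mp h
    rw [dedup_cons, List.filter_eq_self.mpr
      (fun y hy => by simp only [ne_eq, decide_eq_true_eq]; exact fun he => hx.1 (he ▸ hy)),
      ih hx.2]

theorem dedup_idem (l : List (List Int)) :
    PySem.List.dedup (PySem.List.dedup l) = PySem.List.dedup l :=
  dedup_of_nodup _ (PySem.List.nodup_dedup l)

theorem srt_pairwise (sequences : List (List Int)) :
    (PySem.List.sorted (PySem.List.dedup sequences) (fun x => x) false).Pairwise (· < ·) := by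
  have h := PySem.List.sorted_ofList_pairwise_lt (xs := sequences)
  convert h using 2

theorem bestDict_items (srt : List (List Int)) (adj : List Nat) (hnd : srt.Nodup) :
    (bestDict srt adj).items
      = (PySem.List.enumerate srt).map (fun p => (p.2, bVal adj p.1)) := by
  have hb : bestDict srt adj
      = (PySem.List.enumerate srt).foldl (fun d p => d.insert p.2 (bVal adj p.1)) PySem.Dict.empty := rfl
  rw [hb]
  have := PySem.Dict.items_foldl_insert_fresh (PySem.List.enumerate srt)
    (fun p => p.2) (fun p => bVal adj p.1) PySem.Dict.empty
    (fun a _ => PySem.Dict.contains_empty a.2)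
    (by rw [PySem.List.map_snd_enumerate]; exact hnd)
  simpa using this

theorem bestOf_neighbors (sequences : List (List Int)) (srt : List (List Int))
    (hmemiff : ∀ t, t ∈ srt ↔ t ∈ sequences) (hpair : srt.Pairwise (· < ·))
    (i : Nat) (hi : i < srt.length) :
    bestOf (srt[i]) sequences =
      max (if h : 0 < i then lcp_len (srt[i-1]'(by omega)) srt[i] else 0)
          (if h : i + 1 < srt.length then lcp_len srt[i] (srt[i+1]'h) else 0) := by
  have hmono : ∀ (j k : Nat) (hj : j < srt.length) (hk : k < srt.length), j < k → srt[j] < srt[k] :=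
    fun j k hj hk hjk => (List.pairwise_iff_getElem.mp hpair) j k hj hk hjk
  apply Nat.le_antisymm
  · apply foldl_max_le
    intro v hv
    obtain ⟨t, ht, rfl⟩ := List.mem_map.mp hv
    obtain ⟨htm, hts⟩ := List.mem_filter.mp ht
    have hne : srt[i] ≠ t := by simpa using hts
    obtain ⟨j, hj, rfl⟩ := List.mem_iff_getElem.mp ((hmemiff t).mpr htm)
    have hji : j ≠ i := fun h => hne (by subst h; rfl)
    rcases Nat.lt_or_ge j i with hlt | hge
    · have h0 : 0 < i := by omega
      refine le_trans ?_ (le_max_left _ _)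
      rw [dif_pos h0]
      rw [lcp_len_comm]
      rcases eq_or_ne j (i-1) with hj1 | hj1
      · subst hj1; exact le_refl _
      · exact (lcp_between srt[j] (srt[i-1]'(by omega)) srt[i]
          (hmono j (i-1) hj (by omega) (by omega)) (hmono (i-1) i (by omega) hi (by omega))).2
    · have hgt : i < j := by omega
      have h1 : i + 1 < srt.length := by omega
      refine le_trans ?_ (le_max_right _ _)
      rw [dif_pos h1]
      rcases eq_or_ne j (i+1) with hj1 | hj1
      · subst hj1; exact le_refl _
      · exact (lcp_between srt[i] (srt[i+1]'h1) srt[j]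
          (hmono i (i+1) hi h1 (by omega)) (hmono (i+1) j h1 hj (by omega))).1
  · apply max_le
    · split
      · rename_i h0
        have hmem : (srt[i-1]'(by omega)) ∈ sequences := (hmemiff _).mp (List.getElem_mem _)
        have hne : srt[i] ≠ srt[i-1]'(by omega) :=
          ne_of_gt (hmono (i-1) i (by omega) hi (by omega))
        rw [lcp_len_comm]
        exact le_foldl_max' (List.mem_map_of_mem
          (List.mem_filter.mpr ⟨hmem, by simpa using hne⟩))
      · exact Nat.zero_le _
    · split
      · rename_i h1
        have hmem : (srt[i+1]'h1) ∈ sequences := (hmemiff _).mp (List.getElem_mem _)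
        have hne : srt[i] ≠ srt[i+1]'h1 := ne_of_lt (hmono i (i+1) hi h1 (by omega))
        exact le_foldl_max' (List.mem_map_of_mem
          (List.mem_filter.mpr ⟨hmem, by simpa using hne⟩))
      · exact Nat.zero_le _

theorem bVal_eq (srt : List (List Int)) (adj : List Nat) (hlen : adj.length = srt.length - 1)
    (hadj : ∀ (j : Nat) (hj : j + 1 < srt.length),
      adj[j]'(by omega) = lcp_len (srt[j]'(by omega)) (srt[j+1]'hj))
    (i : Nat) (hi : i < srt.length) :
    bVal adj (i : Int) =
      max (if h : 0 < i then lcp_len (srt[i-1]'(by omega)) srt[i] else 0)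
          (if h : i + 1 < srt.length then lcp_len srt[i] (srt[i+1]'h) else 0) := by
  unfold bVal
  simp only
  have hL : (if 0 < (i : Int) then PySem.List.pyGetD adj ((i : Int) - 1) 0 else 0)
      = (if h : 0 < i then lcp_len (srt[i-1]'(by omega)) srt[i] else 0) := by
    by_cases h0 : 0 < i
    · rw [if_pos (by exact_mod_cast h0), dif_pos h0]
      have hc : ((i : Int) - 1) = ((i - 1 : Nat) : Int) := by omega
      simp only [hc, PySem.List.pyGetD_natCast]
      rw [List.getD_eq_getElem _ _ (by omega)]
      rw [hadj (i-1) (by omega)]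
      congr 1
      congr 1
      omega
    · rw [if_neg (show ¬ (0:Int) < (i:Int) by omega), dif_neg h0]
  have hR : (if (i : Int) < PySem.List.len adj then PySem.List.pyGetD adj (i : Int) 0 else 0)
      = (if h : i + 1 < srt.length then lcp_len srt[i] (srt[i+1]'h) else 0) := by
    by_cases h1 : i + 1 < srt.length
    · rw [if_pos (by simp only [PySem.List.len_eq]; omega), dif_pos h1]
      simp only [PySem.List.pyGetD_natCast]
      rw [List.getD_eq_getElem _ _ (by omega)]
      exact hadj i h1
    · rw [if_neg (by simp only [PySem.List.len_eq]; omega), dif_neg h1]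
  rw [hL, hR]
  by_cases h : (if h : i + 1 < srt.length then lcp_len srt[i] (srt[i+1]'h) else 0)
      < (if h : 0 < i then lcp_len (srt[i-1]'(by omega)) srt[i] else 0)
  · rw [if_pos h, Nat.max_eq_left (Nat.le_of_lt h)]
  · rw [if_neg h, Nat.max_eq_right (Nat.le_of_not_lt h)]

theorem FB_eq (sequences : List (List Int)) (s : List Int) (hs : s ∈ sequences) :
    B_val sequences s = finish s (bestOf s sequences) := by
  unfold B_val
  simp only
  have hpair := srt_pairwise sequences
  set srt := PySem.List.sorted (PySem.List.dedup sequences) (fun x => x) false with hsrt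
  set adj := (srt.zip (srt.drop 1)).map (fun (p : List Int × List Int) => lcp_len p.1 p.2) with hadjdef
  have hnd : srt.Nodup := hpair.imp (fun h => ne_of_lt h)
  have hmemiff : ∀ t, t ∈ srt ↔ t ∈ sequences := fun t =>
    (PySem.List.mem_sorted _ _ _ t).trans (PySem.List.mem_dedup _ _)
  obtain ⟨i, hi, hsi⟩ := List.mem_iff_getElem.mp ((hmemiff s).mpr hs)
  have hkeysnd : (bestDict srt adj).keys.Nodup := by
    simp only [PySem.Dict.keys, bestDict_items srt adj hnd, List.map_map]
    rw [show ((fun (x : List Int × Nat) => x.1) ∘ fun (p : Int × List Int) => (p.2, bVal adj p.1))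
        = (fun (p : Int × List Int) => p.2) from rfl]
    rw [PySem.List.map_snd_enumerate]
    exact hnd
  have hmemit : ((s, bVal adj (i : Int)) : List Int × Nat) ∈ (bestDict srt adj).items := by
    rw [bestDict_items srt adj hnd]
    refine List.mem_map.mpr ⟨((i : Int), s), ?_, rfl⟩
    exact (PySem.List.mem_enumerate_iff _ _ _).mpr ⟨i, hi, by simp [hsi]⟩
  have hgetD : (bestDict srt adj).getD s 0 = bVal adj (i : Int) :=
    PySem.Dict.getD_of_mem_items _ hmemit hkeysnd 0
  have hlenadj : adj.length = srt.length - 1 := by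
    rw [hadjdef]
    simp only [List.length_map, List.length_zip, List.length_drop]
    omega
  have hadj : ∀ (j : Nat) (hj : j + 1 < srt.length),
      adj[j]'(by omega) = lcp_len (srt[j]'(by omega)) (srt[j+1]'hj) := by
    intro j hj
    simp only [hadjdef, List.getElem_map, List.getElem_zip, List.getElem_drop]
    congr 1
    congr 1
    omega
  rw [hgetD, ← hsi, bVal_eq srt adj hlenadj hadj i hi,
    ← bestOf_neighbors sequences srt hmemiff hpair i hi]
  unfold finish
  by_cases h : (srt[i]).drop (bestOf srt[i] sequences) = []
  · rw [if_neg (by simp [h]), if_pos h]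
  · rw [if_pos h, if_neg h]

theorem B_eq_model (sequences : List (List Int)) :
    get_unique_short_sequences_alt sequences = modelOut sequences := by
  rw [B_unfold, final_items, dedup_idem]
  unfold modelOut
  refine List.map_congr_left (fun s hs => ?_)
  rw [FB_eq sequences s ((PySem.List.mem_dedup _ _).mp hs)]

-- ===== VERDICT (by name: the statement is the Claim_ definition above) =====
theorem get_unique_short_sequences_spec : Claim_equal_get_unique_short_sequences := by
  intro sequences _
  unfold Spec_get_unique_short_sequences
  rw [A_eq_model, B_eq_model]
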